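-- pv_equiv track=rewrite | github.com/Pixelapse/pxprocess | process/api.py | _isplit
-- ===== SOURCE A (Python) =====
-- def _isplit(source, sep):
--   sepsize = len(sep)
--   start = 0
--   while True:
--     idx = source.find(sep, start)
--     if idx == -1:
--       yield source[start:]
--       return
--     yield source[start:idx]
--     start = idx + sepsize
-- ===== SOURCE B (Python) =====
-- def _isplit(source, sep):
--     sepsize = len(sep)
--     n = len(source)
--     start = 0
--     i = 0
--     while i <= n - sepsize:
--         if source[i:i+sepsize] == sep:
--             yield source[start:i]
--             i += sepsize
--             start = i
--         else:
--             i += 1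
--     yield source[start:]
-- ===== Notes on version B (the rewrite author's own statement) =====
-- stated objective: alternative
-- what changed: Replaces A's repeated str.find(sep, start) jumps by a single explicit index scan that compares the sepsize-wide window at each position, yielding a segment on each match.
import Mathlib
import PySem

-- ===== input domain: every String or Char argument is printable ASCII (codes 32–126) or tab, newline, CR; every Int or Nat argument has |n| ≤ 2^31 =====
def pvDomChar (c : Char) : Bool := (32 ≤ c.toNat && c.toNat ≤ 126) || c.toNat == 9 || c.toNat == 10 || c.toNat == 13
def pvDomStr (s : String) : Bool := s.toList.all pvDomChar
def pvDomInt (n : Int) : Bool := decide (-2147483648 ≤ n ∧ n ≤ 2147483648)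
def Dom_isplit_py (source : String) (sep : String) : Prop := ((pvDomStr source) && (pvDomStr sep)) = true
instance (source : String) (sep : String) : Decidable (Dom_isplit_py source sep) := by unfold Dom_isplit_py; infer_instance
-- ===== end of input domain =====

-- B replaces A's repeated str.find calls by a single explicit character scan (same generator shape,
-- different mechanism); objective: alternative. Equivalence is about the fully-consumed generator's output list.

-- ===== PORT A =====
-- fuel = a termination guard only (each step advances start by ≥ 1 when sep ≠ []); it never changes the value on Pre_.
def isplitAgo (source : List Char) (sep : List Char) (start : Nat) : Nat → List (List Char)
  | 0 => []
  | fuel+1 =>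
    let idx := PySem.Chars.findFrom source sep (start : Int) none
    if idx = -1 then
      [PySem.List.slice source (some (start : Int)) none]
    else
      PySem.List.slice source (some (start : Int)) (some idx) ::
        isplitAgo source sep (idx.toNat + sep.length) fuel

def isplit_py (source : String) (sep : String) : List String :=
  (isplitAgo source.toList sep.toList 0 (source.toList.length + 1)).map String.ofList

-- ===== PORT B =====
-- fuel = a termination guard only (each step advances i by ≥ 1 when sep ≠ []); it never changes the value on Pre_.
def isplitBgo (source : List Char) (sep : List Char) (n : Nat) (sepsize : Nat) (start : Nat) (i : Nat) : Nat → List (List Char)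
  | 0 => []
  | fuel+1 =>
    if (i : Int) ≤ (n : Int) - (sepsize : Int) then
      if PySem.List.slice source (some (i : Int)) (some ((i : Int) + (sepsize : Int))) = sep then
        PySem.List.slice source (some (start : Int)) (some (i : Int)) ::
          isplitBgo source sep n sepsize (i + sepsize) (i + sepsize) fuel
      else
        isplitBgo source sep n sepsize start (i + 1) fuel
    else
      [PySem.List.slice source (some (start : Int)) none]

def isplit_py_alt (source : String) (sep : String) : List String :=
  (isplitBgo source.toList sep.toList source.toList.length sep.toList.length 0 0 (source.toList.length + 1)).map String.ofList

-- ===== PRECONDITION & SPEC =====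
-- Pre_ excludes sep = "": there Python's A (and B alike) is an infinite generator yielding '' forever,
-- so consuming it never returns a list at all.
def Pre_isplit_py (source : String) (sep : String) : Prop := sep ≠ ""
instance (source : String) (sep : String) : Decidable (Pre_isplit_py source sep) := by unfold Pre_isplit_py; infer_instance
def pvWitness_isplit_py : String × String := ("a,b,,c", ",")

def Spec_isplit_py (source : String) (sep : String) (out : List String) : Prop := out = isplit_py_alt source sep
instance (source : String) (sep : String) (out : List String) : Decidable (Spec_isplit_py source sep out) := by unfold Spec_isplit_py; infer_instance

-- ===== CLAIM (what is proved, stated in full; the proofs are below) =====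
def Claim_equal_isplit_py : Prop := ∀ (source : String) (sep : String), Dom_isplit_py source sep → Pre_isplit_py source sep → Spec_isplit_py source sep (isplit_py source sep)

-- ===== LEMMAS AND PROOFS =====

-- B's window test at i is exactly "sep is a prefix of source.drop i".
theorem pv_window_iff (source sep : List Char) (i : Nat) :
    PySem.List.slice source (some (i : Int)) (some ((i : Int) + (sep.length : Int))) = sep ↔
      sep <+: source.drop i := by
  rw [PySem.List.slice_natCast_add, List.prefix_iff_eq_take]
  exact eq_comm

theorem pv_infix_drop_succ {sep source : List Char} {i : Nat}
    (h : ¬ sep <:+: source.drop i) : ¬ sep <:+: source.drop (i + 1) := by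
  intro hh
  apply h
  have hsuf : source.drop (i + 1) <:+ source.drop i := by
    simpa [List.drop_drop, Nat.add_comm] using List.drop_suffix 1 (source.drop i)
  exact hh.trans hsuf.isInfix

theorem pv_prefix_len {sep source : List Char} {m : Nat} (hsep : sep ≠ [])
    (h : sep <+: source.drop m) : m + sep.length ≤ source.length := by
  have hlen : 1 ≤ sep.length := List.length_pos_iff.mpr hsep
  have h1 := h.length_le
  rw [List.length_drop] at h1
  omega

-- A's loop is fuel-insensitive once fuel ≥ length - start + 1.
theorem A_fuel (source sep : List Char) (hsep : sep ≠ []) :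
    ∀ d start f₁ f₂, source.length - start ≤ d → start ≤ source.length →
      source.length - start + 1 ≤ f₁ → source.length - start + 1 ≤ f₂ →
      isplitAgo source sep start f₁ = isplitAgo source sep start f₂ := by
  intro d
  induction d with
  | zero =>
    intro start f₁ f₂ hd hs h1 h2
    obtain ⟨a, rfl⟩ : ∃ a, f₁ = a + 1 := ⟨f₁ - 1, by omega⟩
    obtain ⟨b, rfl⟩ : ∃ b, f₂ = b + 1 := ⟨f₂ - 1, by omega⟩
    simp only [isplitAgo]
    split
    · rfl
    · rename_i h
      exfalso
      obtain ⟨hk, hpre, -⟩ := PySem.Chars.findFrom_natCast_spec source sep start hs h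
      have := pv_prefix_len hsep hpre
      have hlen : 1 ≤ sep.length := List.length_pos_iff.mpr hsep
      have hk' : (start : Int) ≤ PySem.Chars.findFrom source sep (start : Int) none := hk
      omega
  | succ d ih =>
    intro start f₁ f₂ hd hs h1 h2
    obtain ⟨a, rfl⟩ : ∃ a, f₁ = a + 1 := ⟨f₁ - 1, by omega⟩
    obtain ⟨b, rfl⟩ : ∃ b, f₂ = b + 1 := ⟨f₂ - 1, by omega⟩
    simp only [isplitAgo]
    split
    · rfl
    · rename_i h
      obtain ⟨hk, hpre, -⟩ := PySem.Chars.findFrom_natCast_spec source sep start hs h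
      set idx := PySem.Chars.findFrom source sep (start : Int) none with hidx
      have hlen : 1 ≤ sep.length := List.length_pos_iff.mpr hsep
      have hmn := pv_prefix_len hsep hpre
      have hk' : (start : Int) ≤ idx := hk
      have hkn : start ≤ idx.toNat := by omega
      congr 1
      exact ih (idx.toNat + sep.length) a b (by omega) (by omega) (by omega) (by omega)

-- B's loop is fuel-insensitive once fuel ≥ length - i + 1.
theorem B_fuel (source sep : List Char) (hsep : sep ≠ []) :
    ∀ d start i f₁ f₂, source.length - i ≤ d → i ≤ source.length →
      source.length - i + 1 ≤ f₁ → source.length - i + 1 ≤ f₂ →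
      isplitBgo source sep source.length sep.length start i f₁ =
        isplitBgo source sep source.length sep.length start i f₂ := by
  intro d
  induction d with
  | zero =>
    intro start i f₁ f₂ hd hi h1 h2
    obtain ⟨a, rfl⟩ : ∃ a, f₁ = a + 1 := ⟨f₁ - 1, by omega⟩
    obtain ⟨b, rfl⟩ : ∃ b, f₂ = b + 1 := ⟨f₂ - 1, by omega⟩
    have hlen : 1 ≤ sep.length := List.length_pos_iff.mpr hsep
    simp only [isplitBgo]
    split
    · rename_i h; exfalso; omega
    · rfl
  | succ d ih =>
    intro start i f₁ f₂ hd hi h1 h2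
    obtain ⟨a, rfl⟩ : ∃ a, f₁ = a + 1 := ⟨f₁ - 1, by omega⟩
    obtain ⟨b, rfl⟩ : ∃ b, f₂ = b + 1 := ⟨f₂ - 1, by omega⟩
    have hlen : 1 ≤ sep.length := List.length_pos_iff.mpr hsep
    simp only [isplitBgo]
    split
    · rename_i h
      have hin : i + sep.length ≤ source.length := by omega
      split
      · congr 1
        exact ih (i + sep.length) (i + sep.length) a b (by omega) (by omega) (by omega) (by omega)
      · exact ih start (i + 1) a b (by omega) (by omega) (by omega) (by omega)
    · rfl

-- If sep occurs nowhere at or after i, B's scan runs to the end and yields the tail slice.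
theorem B_none (source sep : List Char) (hsep : sep ≠ []) :
    ∀ d start i f, source.length - i ≤ d → i ≤ source.length →
      ¬ sep <:+: source.drop i → source.length - i + 1 ≤ f →
      isplitBgo source sep source.length sep.length start i f =
        [PySem.List.slice source (some (start : Int)) none] := by
  intro d
  induction d with
  | zero =>
    intro start i f hd hi hno hf
    obtain ⟨a, rfl⟩ : ∃ a, f = a + 1 := ⟨f - 1, by omega⟩
    have hlen : 1 ≤ sep.length := List.length_pos_iff.mpr hsep
    simp only [isplitBgo]
    split
    · rename_i h; exfalso; omega
    · rfl
  | succ d ih =>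
    intro start i f hd hi hno hf
    obtain ⟨a, rfl⟩ : ∃ a, f = a + 1 := ⟨f - 1, by omega⟩
    have hlen : 1 ≤ sep.length := List.length_pos_iff.mpr hsep
    simp only [isplitBgo]
    split
    · rename_i h
      split
      · rename_i hw
        exfalso
        exact hno ((pv_window_iff source sep i).mp hw).isInfix
      · exact ih start (i + 1) a (by omega) (by omega) (pv_infix_drop_succ hno) (by omega)
    · rfl

-- If m is the first occurrence of sep at or after i, B yields the slice up to m and restarts at m + |sep|.
theorem B_found (source sep : List Char) (hsep : sep ≠ []) :
    ∀ d start i m f, m - i ≤ d → i ≤ m →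
      sep <+: source.drop m →
      (∀ j, i ≤ j → j < m → ¬ sep <+: source.drop j) →
      source.length - i + 1 ≤ f →
      isplitBgo source sep source.length sep.length start i f =
        PySem.List.slice source (some (start : Int)) (some (m : Int)) ::
          isplitBgo source sep source.length sep.length (m + sep.length) (m + sep.length)
            (source.length - (m + sep.length) + 1) := by
  intro d
  induction d with
  | zero =>
    intro start i m f hd him hpre hmin hf
    have him : i = m := by omega
    subst him
    have hlen : 1 ≤ sep.length := List.length_pos_iff.mpr hsep
    have hmn := pv_prefix_len hsep hpre
    obtain ⟨a, rfl⟩ : ∃ a, f = a + 1 := ⟨f - 1, by omega⟩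
    simp only [isplitBgo]
    rw [if_pos (by omega), if_pos ((pv_window_iff source sep i).mpr hpre)]
    congr 1
    exact B_fuel source sep hsep (source.length - (i + sep.length)) (i + sep.length) (i + sep.length)
      a (source.length - (i + sep.length) + 1) (by omega) (by omega) (by omega) (by omega)
  | succ d ih =>
    intro start i m f hd him hpre hmin hf
    have hlen : 1 ≤ sep.length := List.length_pos_iff.mpr hsep
    have hmn := pv_prefix_len hsep hpre
    obtain ⟨a, rfl⟩ : ∃ a, f = a + 1 := ⟨f - 1, by omega⟩
    simp only [isplitBgo]
    rw [if_pos (by omega)]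
    by_cases him' : i = m
    · subst him'
      rw [if_pos ((pv_window_iff source sep i).mpr hpre)]
      congr 1
      exact B_fuel source sep hsep (source.length - (i + sep.length)) (i + sep.length) (i + sep.length)
        a (source.length - (i + sep.length) + 1) (by omega) (by omega) (by omega) (by omega)
    · rw [if_neg (fun hw => hmin i le_rfl (by omega) ((pv_window_iff source sep i).mp hw))]
      exact ih start (i + 1) m a (by omega) (by omega) hpre
        (fun j hj1 hj2 => hmin j (by omega) hj2) (by omega)

-- Main: with canonical fuel, A's find-driven loop equals B's scan from any start.
theorem AB_main (source sep : List Char) (hsep : sep ≠ []) :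
    ∀ d start, source.length - start ≤ d → start ≤ source.length →
      isplitAgo source sep start (source.length - start + 1) =
        isplitBgo source sep source.length sep.length start start (source.length - start + 1) := by
  intro d
  induction d with
  | zero =>
    intro start hd hs
    have hlen : 1 ≤ sep.length := List.length_pos_iff.mpr hsep
    simp only [isplitAgo]
    split
    · rename_i h
      have hno : ¬ sep <:+: source.drop start :=
        (PySem.Chars.findFrom_natCast_eq_neg_one_iff source sep start hs).mp h
      exact (B_none source sep hsep (source.length - start) start start _ (by omega) hs hno (by omega)).symm
    · rename_i h
      exfalso
      obtain ⟨hk, hpre, -⟩ := PySem.Chars.findFrom_natCast_spec source sep start hs h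
      have := pv_prefix_len hsep hpre
      have hk' : (start : Int) ≤ PySem.Chars.findFrom source sep (start : Int) none := hk
      omega
  | succ d ih =>
    intro start hd hs
    have hlen : 1 ≤ sep.length := List.length_pos_iff.mpr hsep
    simp only [isplitAgo]
    split
    · rename_i h
      have hno : ¬ sep <:+: source.drop start :=
        (PySem.Chars.findFrom_natCast_eq_neg_one_iff source sep start hs).mp h
      exact (B_none source sep hsep (source.length - start) start start _ (by omega) hs hno (by omega)).symm
    · rename_i h
      obtain ⟨hk, hpre, hmin⟩ := PySem.Chars.findFrom_natCast_spec source sep start hs h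
      set idx := PySem.Chars.findFrom source sep (start : Int) none with hidx
      have hk' : (start : Int) ≤ idx := hk
      have hkn : start ≤ idx.toNat := by omega
      have hmn := pv_prefix_len hsep hpre
      rw [B_found source sep hsep (idx.toNat - start) start start idx.toNat _ (by omega) hkn hpre
        (fun j hj1 hj2 => hmin j hj1 hj2) (by omega)]
      have hcast : (some idx) = (some ((idx.toNat : Nat) : Int)) := by
        congr 1; omega
      rw [hcast]
      congr 1
      rw [A_fuel source sep hsep (source.length - (idx.toNat + sep.length)) (idx.toNat + sep.length)
        (source.length - start) (source.length - (idx.toNat + sep.length) + 1)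
        (by omega) (by omega) (by omega) (by omega)]
      exact ih (idx.toNat + sep.length) (by omega) (by omega)

theorem toList_ne_nil_of_ne_empty {s : String} (h : s ≠ "") : s.toList ≠ [] := by
  intro hn
  apply h
  have := congrArg String.ofList hn
  rwa [String.ofList_toList] at this

-- ===== VERDICT (by name: the statement is the Claim_ definition above) =====
theorem isplit_py_spec : Claim_equal_isplit_py := by
  intro source sep _ hpre
  unfold Spec_isplit_py isplit_py isplit_py_alt
  have hsep : sep.toList ≠ [] := toList_ne_nil_of_ne_empty hpre
  congr 1
  have := AB_main source.toList sep.toList hsep source.toList.length 0 (by omega) (by omega)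
  simpa using this
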